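-- pv_equiv track=rewrite | github.com/pypi-data/pypi-mirror-41 | packages/mhelper/mhelper-1.0.1.69.tar.gz/mhelper-1.0.1.69/mhelper/array_helper.py | when_first_or_last
-- ===== SOURCE A (Python) =====
-- from typing import List, Optional, Iterator, Tuple, Dict, Iterable, Union, TypeVar, Callable
--
-- T = TypeVar( "T" )
--
-- def when_first_or_last( iterable: Iterable[T] ) -> (T, bool, bool):
--     is_first = True
--     last_item = None
--     has_yielded_first = True
--
--     for item in iterable:
--         if not is_first:
--             yield last_item, has_yielded_first, False
--             has_yielded_first = False
--         else:
--             is_first = False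
--
--         last_item = item
--
--     if not is_first:
--         yield last_item, has_yielded_first, True
-- ===== SOURCE B (Python) =====
-- def when_first_or_last(iterable):
--     items = list(iterable)
--     n = len(items)
--     for i, item in enumerate(items):
--         yield item, i == 0, i == n - 1
-- ===== Notes on version B (the rewrite author's own statement) =====
-- stated objective: simpler
-- what changed: Replaces A's one-behind buffer with is_first/has_yielded_first flag bookkeeping by a single enumerate pass over the materialized list, yielding (item, i == 0, i == n - 1) directly.
import Mathlib
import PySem

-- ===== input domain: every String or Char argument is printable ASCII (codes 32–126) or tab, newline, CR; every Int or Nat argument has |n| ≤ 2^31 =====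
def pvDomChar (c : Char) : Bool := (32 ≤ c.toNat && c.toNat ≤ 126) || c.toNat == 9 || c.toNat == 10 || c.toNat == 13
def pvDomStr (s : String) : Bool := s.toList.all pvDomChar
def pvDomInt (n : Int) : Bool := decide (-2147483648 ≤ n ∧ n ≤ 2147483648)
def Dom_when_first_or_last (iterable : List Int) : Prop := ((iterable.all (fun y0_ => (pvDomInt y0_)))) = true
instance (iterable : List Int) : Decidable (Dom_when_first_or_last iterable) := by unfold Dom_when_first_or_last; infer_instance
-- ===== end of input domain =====

-- B replaces A's one-behind buffer and is_first/has_yielded_first flags with a single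
-- enumerate pass over the materialized list, yielding (item, i == 0, i == n - 1); simpler, same cost.


-- ===== PORT A =====
-- loop state: (is_first, last_item, has_yielded_first), accumulated yields in order
def whenAuxA : List Int → Bool → Option Int → Bool → List (Int × Bool × Bool)
  | [], is_first, last_item, hyf =>
      if is_first = false then
        (match last_item with
         | some x => [(x, hyf, true)]
         | none => [])
      else []
  | item :: rest, is_first, last_item, hyf =>
      if is_first = false then
        (match last_item with
         | some x => [(x, hyf, false)]
         | none => []) ++ whenAuxA rest is_first (some item) false
      else
        whenAuxA rest false (some item) hyf

def when_first_or_last (iterable : List Int) : List (Int × Bool × Bool) :=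
  whenAuxA iterable true none true

-- ===== PORT B =====
def when_first_or_last_alt (iterable : List Int) : List (Int × Bool × Bool) :=
  (PySem.List.enumerate iterable 0).map
    (fun p => (p.2, p.1 == 0, p.1 == (iterable.length : Int) - 1))

-- ===== PRECONDITION & SPEC =====
def Spec_when_first_or_last (iterable : List Int) (out : List (Int × Bool × Bool)) : Prop := out = when_first_or_last_alt iterable
instance (iterable : List Int) (out : List (Int × Bool × Bool)) : Decidable (Spec_when_first_or_last iterable out) := by unfold Spec_when_first_or_last; infer_instance

-- ===== CLAIM (what is proved, stated in full; the proofs are below) =====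
def Claim_equal_when_first_or_last : Prop := ∀ (iterable : List Int), Dom_when_first_or_last iterable → Spec_when_first_or_last iterable (when_first_or_last iterable)

-- ===== LEMMAS AND PROOFS =====

lemma whenAuxA_key (rest : List Int) (l : Int) (hyf : Bool) (s : Int) :
    whenAuxA rest false (some l) hyf =
      (l, hyf, rest.isEmpty) ::
        (PySem.List.enumerate rest s).map
          (fun p => (p.2, false, p.1 == s + (rest.length : Int) - 1)) := by
  induction rest generalizing l hyf s with
  | nil => simp [whenAuxA, PySem.List.enumerate]
  | cons a xs ih =>
      have harith : s + ((a :: xs).length : Int) - 1 = (s + 1) + (xs.length : Int) - 1 := by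
        push_cast [List.length_cons]; ring
      have hflag : (s == s + 1 + (xs.length : Int) - 1) = xs.isEmpty := by
        cases xs with
        | nil => simp
        | cons b ys => simp; omega
      simp only [whenAuxA, PySem.List.enumerate_cons, List.map_cons, harith,
        ih a false (s + 1), reduceIte, List.cons_append, List.nil_append, hflag,
        List.isEmpty_cons]

-- ===== VERDICT (by name: the statement is the Claim_ definition above) =====
theorem when_first_or_last_spec : Claim_equal_when_first_or_last := by
  intro iterable _
  unfold Spec_when_first_or_last when_first_or_last when_first_or_last_alt
  cases iterable with
  | nil => simp [whenAuxA, PySem.List.enumerate]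
  | cons a xs =>
      simp only [whenAuxA, if_neg (by decide : ¬ (true = false))]
      rw [whenAuxA_key xs a true 1]
      simp only [PySem.List.enumerate_cons, List.map_cons]
      have hlen : ((a :: xs).length : Int) - 1 = 1 + (xs.length : Int) - 1 := by push_cast [List.length_cons]; ring
      rw [hlen]
      refine congrArg₂ _ ?_ ?_
      · cases xs with
        | nil => simp
        | cons b ys => simp; omega
      · refine List.map_congr_left (fun p hp => ?_)
        rcases (PySem.List.mem_enumerate_iff _ _ _).mp hp with ⟨k, hk, rfl⟩
        simp
        omega
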